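-- pv_equiv track=rewrite | github.com/zogratis17/eduscore-ai | backend/app/services/evaluation_orchestrator.py | _match_criterion
-- ===== SOURCE A (Python) =====
-- def _match_criterion(name: str) -> str:
--     """Map a rubric criterion name to an internal score key."""
--     n = name.lower()
--     grammar_words = ["grammar", "mechanic", "spelling", "punctuation", "syntax"]
--     vocab_words = ["vocab", "lexic", "word choice", "diction", "language use"]
--     coherence_words = ["coheren", "flow", "structure", "organization", "logic", "clarity",
--                        "consistency", "quality"]
--     topic_words = ["topic", "relevan", "prompt", "focus", "content", "thesis", "argument"]
--
--     if any(w in n for w in grammar_words):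
--         return "grammar"
--     elif any(w in n for w in vocab_words):
--         return "vocabulary"
--     elif any(w in n for w in coherence_words):
--         return "coherence"
--     elif any(w in n for w in topic_words):
--         return "topic_relevance"
--     return None
-- ===== SOURCE B (Python) =====
-- # Single left-to-right scan over the text: at each position, try every keyword as a
-- # prefix and keep the minimum-precedence (rank) matching category seen anywhere.
-- _FLAT = [
--     ("grammar", 0), ("mechanic", 0), ("spelling", 0), ("punctuation", 0), ("syntax", 0),
--     ("vocab", 1), ("lexic", 1), ("word choice", 1), ("diction", 1), ("language use", 1),
--     ("coheren", 2), ("flow", 2), ("structure", 2), ("organization", 2), ("logic", 2),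
--     ("clarity", 2), ("consistency", 2), ("quality", 2),
--     ("topic", 3), ("relevan", 3), ("prompt", 3), ("focus", 3), ("content", 3),
--     ("thesis", 3), ("argument", 3),
-- ]
--
-- _KEYS = ["grammar", "vocabulary", "coherence", "topic_relevance"]
--
--
-- def _match_criterion(name: str) -> str:
--     n = name.lower()
--     best = None
--     for i in range(len(n)):
--         for w, r in _FLAT:
--             if n.startswith(w, i) and (best is None or r < best):
--                 best = r
--     return None if best is None else _KEYS[best]
-- ===== Notes on version B (the rewrite author's own statement) =====
-- stated objective: alternative
-- what changed: Instead of A's per-category any()-substring-membership chain, B makes one left-to-right scan over the lowered text, at each position prefix-matching every keyword from a flat (keyword, rank) table and keeping the minimum rank seen, then maps that rank to its key.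
import Mathlib
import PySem

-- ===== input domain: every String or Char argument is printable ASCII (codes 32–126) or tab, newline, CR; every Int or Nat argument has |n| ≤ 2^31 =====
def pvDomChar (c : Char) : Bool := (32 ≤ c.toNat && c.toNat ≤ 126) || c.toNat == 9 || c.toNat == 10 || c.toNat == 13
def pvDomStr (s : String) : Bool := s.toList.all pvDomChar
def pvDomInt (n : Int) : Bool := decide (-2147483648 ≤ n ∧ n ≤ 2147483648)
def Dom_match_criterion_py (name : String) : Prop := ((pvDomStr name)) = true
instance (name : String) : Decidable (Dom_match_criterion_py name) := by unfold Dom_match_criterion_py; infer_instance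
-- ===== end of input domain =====

-- B replaces A's per-category any()-substring chain by one positional scan of the lowered
-- text with a flat (keyword, rank) table and a minimum-rank accumulator (alternative algorithm; not faster).


-- ===== PORT A =====
def match_criterion_py (name : String) : Option String :=
  let n := PySem.Str.lower name
  let grammar_words := ["grammar", "mechanic", "spelling", "punctuation", "syntax"]
  let vocab_words := ["vocab", "lexic", "word choice", "diction", "language use"]
  let coherence_words := ["coheren", "flow", "structure", "organization", "logic", "clarity",
                          "consistency", "quality"]
  let topic_words := ["topic", "relevan", "prompt", "focus", "content", "thesis", "argument"]
  if grammar_words.any (fun w => PySem.Str.isIn w n) then some "grammar"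
  else if vocab_words.any (fun w => PySem.Str.isIn w n) then some "vocabulary"
  else if coherence_words.any (fun w => PySem.Str.isIn w n) then some "coherence"
  else if topic_words.any (fun w => PySem.Str.isIn w n) then some "topic_relevance"
  else none

-- ===== PORT B =====
-- flat (keyword, precedence-rank) table, = _FLAT in Source B
def pvFlat : List (String × Nat) :=
  [("grammar", 0), ("mechanic", 0), ("spelling", 0), ("punctuation", 0), ("syntax", 0),
   ("vocab", 1), ("lexic", 1), ("word choice", 1), ("diction", 1), ("language use", 1),
   ("coheren", 2), ("flow", 2), ("structure", 2), ("organization", 2), ("logic", 2),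
   ("clarity", 2), ("consistency", 2), ("quality", 2),
   ("topic", 3), ("relevan", 3), ("prompt", 3), ("focus", 3), ("content", 3),
   ("thesis", 3), ("argument", 3)]

def pvKeys : List String := ["grammar", "vocabulary", "coherence", "topic_relevance"]

-- 'best is None or r < best: best = r' (short-circuit 'and' became the nested match)
def pvUpd (b : Option Nat) (r : Nat) : Option Nat :=
  match b with
  | none => some r
  | some c => if r < c then some r else some c

-- inner 'for w, r in _FLAT'; n.startswith(w, i) with 0 ≤ i is exactly
-- 'w.toList is a prefix of (n.drop i)' (exact for ASCII and beyond)
def pvStep (n : List Char) (i : Nat) (b : Option Nat) : Option Nat :=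
  pvFlat.foldl (fun b p => if p.1.toList.isPrefixOf (n.drop i) then pvUpd b p.2 else b) b

def match_criterion_py_alt (name : String) : Option String :=
  let n := (PySem.Str.lower name).toList
  let best := (List.range n.length).foldl (fun b i => pvStep n i b) none
  match best with
  | none => none
  | some r => PySem.List.pyGet? pvKeys (Int.ofNat r)  -- _KEYS[best]; rank always in range

-- ===== PRECONDITION & SPEC =====
def Spec_match_criterion_py (name : String) (out : Option String) : Prop := out = match_criterion_py_alt name
instance (name : String) (out : Option String) : Decidable (Spec_match_criterion_py name out) := by unfold Spec_match_criterion_py; infer_instance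

-- ===== CLAIM (what is proved, stated in full; the proofs are below) =====
def Claim_equal_match_criterion_py : Prop := ∀ (name : String), Dom_match_criterion_py name → Spec_match_criterion_py name (match_criterion_py name)

-- ===== LEMMAS AND PROOFS =====

-- the list of ranks hit by the scan, in scan order
def pvRanks (n : List Char) : List Nat :=
  (List.range n.length).flatMap
    (fun i => ((pvFlat.filter (fun p => p.1.toList.isPrefixOf (n.drop i))).map Prod.snd))

theorem pv_inner_filter (l : List (String × Nat)) (c : String × Nat → Bool) (b : Option Nat) :
    l.foldl (fun b p => if c p then pvUpd b p.2 else b) b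
      = ((l.filter c).map Prod.snd).foldl pvUpd b := by
  induction l generalizing b with
  | nil => rfl
  | cons p rest ih =>
      by_cases h : c p = true <;> simp [h, ih]

theorem pv_outer_flatMap (is : List Nat) (h : Nat → List Nat) (b : Option Nat) :
    is.foldl (fun b i => (h i).foldl pvUpd b) b = (is.flatMap h).foldl pvUpd b := by
  induction is generalizing b with
  | nil => rfl
  | cons i rest ih => simp [List.flatMap_cons, List.foldl_append, ih]

theorem pv_fold_eq_ranks (name : String) :
    (List.range ((PySem.Str.lower name).toList.length)).foldl
        (fun b i => pvStep (PySem.Str.lower name).toList i b) none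
      = (pvRanks (PySem.Str.lower name).toList).foldl pvUpd none := by
  unfold pvStep pvRanks
  rw [← pv_outer_flatMap]
  congr 1
  funext b i
  exact pv_inner_filter _ _ _

-- pvUpd from a some-state is Nat.min
theorem pv_foldl_upd_some (l : List Nat) (c : Nat) :
    l.foldl pvUpd (some c) = some (l.foldl Nat.min c) := by
  induction l generalizing c with
  | nil => rfl
  | cons r t ih =>
      have h : pvUpd (some c) r = some (Nat.min c r) := by
        simp only [pvUpd, Nat.min_def]
        split_ifs <;> simp <;> omega
      simp [h, ih]

theorem pv_foldl_min_le (t : List Nat) (a : Nat) :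
    t.foldl Nat.min a ≤ a ∧ ∀ x ∈ t, t.foldl Nat.min a ≤ x := by
  induction t generalizing a with
  | nil => simp
  | cons b t ih =>
      obtain ⟨h1, h2⟩ := ih (Nat.min a b)
      refine ⟨le_trans h1 (Nat.min_le_left _ _), ?_⟩
      intro x hx
      rcases List.mem_cons.mp hx with rfl | hx
      · exact le_trans h1 (Nat.min_le_right _ _)
      · exact h2 x hx

theorem pv_foldl_min_mem (t : List Nat) (a : Nat) :
    t.foldl Nat.min a = a ∨ t.foldl Nat.min a ∈ t := by
  induction t generalizing a with
  | nil => simp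
  | cons b t ih =>
      rcases ih (Nat.min a b) with h | h
      · simp only [List.foldl_cons, h]
        rcases le_total a b with hab | hab
        · left; exact Nat.min_eq_left hab
        · right
          have : Nat.min a b = b := Nat.min_eq_right hab
          rw [this]; exact List.mem_cons_self
      · right; exact List.mem_cons_of_mem _ h

-- the fold computes the minimum of the rank list
theorem pv_foldl_upd_min (l : List Nat) (m : Nat) (hm : m ∈ l) (hle : ∀ x ∈ l, m ≤ x) :
    l.foldl pvUpd none = some m := by
  cases l with
  | nil => cases hm
  | cons a t =>
      have : pvUpd none a = some a := rfl
      simp only [List.foldl_cons, this, pv_foldl_upd_some]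
      congr 1
      obtain ⟨h1, h2⟩ := pv_foldl_min_le t a
      have hub : t.foldl Nat.min a ≤ m := by
        rcases List.mem_cons.mp hm with rfl | hmt
        · exact h1
        · exact h2 m hmt
      have hlb : m ≤ t.foldl Nat.min a := by
        rcases pv_foldl_min_mem t a with h | h
        · rw [h]; exact hle a List.mem_cons_self
        · exact hle _ (List.mem_cons_of_mem _ h)
      omega

-- bounded positional prefix match ⟺ Python substring containment, for nonempty keywords
theorem pv_bounded_iff_isIn (w s : List Char) (hw : w ≠ []) :
    (∃ i, i < s.length ∧ w <+: s.drop i) ↔ PySem.Chars.isIn w s = true := by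
  rw [← PySem.Chars.exists_prefix_drop_iff_isIn]
  constructor
  · rintro ⟨i, _, h⟩; exact ⟨i, h⟩
  · rintro ⟨j, h⟩
    by_cases hj : j < s.length
    · exact ⟨j, hj, h⟩
    · exfalso
      rw [List.drop_eq_nil_of_le (by omega)] at h
      exact hw (List.prefix_nil.mp h)

theorem pv_mem_ranks (n : List Char) (x : Nat) :
    x ∈ pvRanks n ↔ ∃ p ∈ pvFlat, p.2 = x ∧ ∃ i, i < n.length ∧ p.1.toList <+: n.drop i := by
  simp only [pvRanks, List.mem_flatMap, List.mem_range, List.mem_map, List.mem_filter,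
    List.isPrefixOf_iff_prefix]
  constructor
  · rintro ⟨i, hi, p, ⟨hp, hpre⟩, hx⟩
    exact ⟨p, hp, hx, i, hi, hpre⟩
  · rintro ⟨p, hp, hx, i, hi, hpre⟩
    exact ⟨i, hi, p, ⟨hp, hpre⟩, hx⟩

-- membership in pvRanks for one category, reduced to its word list
theorem pv_cat (n : List Char) (r : Nat) (ws : List String)
    (hsub : ∀ w ∈ ws, (w, r) ∈ pvFlat)
    (hsup : ∀ p ∈ pvFlat, p.2 = r → p.1 ∈ ws) :
    (r ∈ pvRanks n) ↔ ∃ w ∈ ws, ∃ i, i < n.length ∧ w.toList <+: n.drop i := by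
  rw [pv_mem_ranks]
  constructor
  · rintro ⟨p, hp, hr, hq⟩; exact ⟨p.1, hsup p hp hr, hq⟩
  · rintro ⟨w, hw, hq⟩; exact ⟨(w, r), hsub w hw, rfl, hq⟩

theorem pv_exists_iff (ws : List String) (n : List Char) (h : ∀ w ∈ ws, w.toList ≠ []) :
    (∃ w ∈ ws, ∃ i, i < n.length ∧ w.toList <+: n.drop i)
      ↔ ws.any (fun w => PySem.Chars.isIn w.toList n) = true := by
  simp only [List.any_eq_true]
  constructor
  · rintro ⟨w, hw, hq⟩
    exact ⟨w, hw, (pv_bounded_iff_isIn w.toList n (h w hw)).mp hq⟩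
  · rintro ⟨w, hw, hq⟩
    exact ⟨w, hw, (pv_bounded_iff_isIn w.toList n (h w hw)).mpr hq⟩

theorem pv_rank_cat (n : List Char) (r : Nat) (ws : List String)
    (hsub : ∀ w ∈ ws, (w, r) ∈ pvFlat)
    (hsup : ∀ p ∈ pvFlat, p.2 = r → p.1 ∈ ws)
    (hne : ∀ w ∈ ws, w.toList ≠ []) :
    (r ∈ pvRanks n) ↔ ws.any (fun w => PySem.Chars.isIn w.toList n) = true :=
  (pv_cat n r ws hsub hsup).trans (pv_exists_iff ws n hne)

theorem pv_ranks_le (n : List Char) (x : Nat) (hx : x ∈ pvRanks n) : x ≤ 3 := by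
  rw [pv_mem_ranks] at hx
  obtain ⟨p, hp, hr, -⟩ := hx
  have h : ∀ p ∈ pvFlat, p.2 ≤ 3 := by decide
  exact hr ▸ h p hp

-- ===== VERDICT (by name: the statement is the Claim_ definition above) =====
theorem match_criterion_py_spec : Claim_equal_match_criterion_py := by
  intro name _
  unfold Spec_match_criterion_py match_criterion_py match_criterion_py_alt
  dsimp only
  rw [pv_fold_eq_ranks]
  simp only [PySem.Str.isIn_eq, PySem.Str.toList_lower]
  have h0 := pv_rank_cat (PySem.Chars.lower name.toList) 0
    ["grammar", "mechanic", "spelling", "punctuation", "syntax"] (by decide) (by decide) (by decide)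
  have h1 := pv_rank_cat (PySem.Chars.lower name.toList) 1
    ["vocab", "lexic", "word choice", "diction", "language use"] (by decide) (by decide) (by decide)
  have h2 := pv_rank_cat (PySem.Chars.lower name.toList) 2
    ["coheren", "flow", "structure", "organization", "logic", "clarity", "consistency", "quality"]
    (by decide) (by decide) (by decide)
  have h3 := pv_rank_cat (PySem.Chars.lower name.toList) 3
    ["topic", "relevan", "prompt", "focus", "content", "thesis", "argument"]
    (by decide) (by decide) (by decide)
  by_cases hg : (List.any ["grammar", "mechanic", "spelling", "punctuation", "syntax"]
      fun w => PySem.Chars.isIn w.toList (PySem.Chars.lower name.toList)) = true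
  · rw [if_pos hg, pv_foldl_upd_min _ 0 (h0.mpr hg) (fun x _ => Nat.zero_le x)]
    rfl
  · rw [if_neg hg]
    by_cases hv : (List.any ["vocab", "lexic", "word choice", "diction", "language use"]
        fun w => PySem.Chars.isIn w.toList (PySem.Chars.lower name.toList)) = true
    · have hle : ∀ x ∈ pvRanks (PySem.Chars.lower name.toList), 1 ≤ x := by
        intro x hx
        rcases Nat.eq_zero_or_pos x with rfl | h
        · exact absurd (h0.mp hx) hg
        · exact h
      rw [if_pos hv, pv_foldl_upd_min _ 1 (h1.mpr hv) hle]
      rfl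
    · rw [if_neg hv]
      by_cases hc : (List.any ["coheren", "flow", "structure", "organization", "logic",
          "clarity", "consistency", "quality"]
          fun w => PySem.Chars.isIn w.toList (PySem.Chars.lower name.toList)) = true
      · have hle : ∀ x ∈ pvRanks (PySem.Chars.lower name.toList), 2 ≤ x := by
          intro x hx
          have := pv_ranks_le _ x hx
          interval_cases x
          · exact absurd (h0.mp hx) hg
          · exact absurd (h1.mp hx) hv
          · omega
          · omega
        rw [if_pos hc, pv_foldl_upd_min _ 2 (h2.mpr hc) hle]
        rfl
      · rw [if_neg hc]
        by_cases ht : (List.any ["topic", "relevan", "prompt", "focus", "content",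
            "thesis", "argument"]
            fun w => PySem.Chars.isIn w.toList (PySem.Chars.lower name.toList)) = true
        · have hle : ∀ x ∈ pvRanks (PySem.Chars.lower name.toList), 3 ≤ x := by
            intro x hx
            have := pv_ranks_le _ x hx
            interval_cases x
            · exact absurd (h0.mp hx) hg
            · exact absurd (h1.mp hx) hv
            · exact absurd (h2.mp hx) hc
            · omega
          rw [if_pos ht, pv_foldl_upd_min _ 3 (h3.mpr ht) hle]
          rfl
        · have hnil : pvRanks (PySem.Chars.lower name.toList) = [] := by
            rw [List.eq_nil_iff_forall_not_mem]
            intro x hx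
            have := pv_ranks_le _ x hx
            interval_cases x
            · exact hg (h0.mp hx)
            · exact hv (h1.mp hx)
            · exact hc (h2.mp hx)
            · exact ht (h3.mp hx)
          rw [if_neg ht, hnil]
          rfl
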